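-- pv_equiv track=rewrite | github.com/hyeongyun0916/Algorithm | temp/5 copy.py | minimize_multiplication
-- ===== SOURCE A (Python) =====
-- def get_value(A):
--     value = 0
--     for i in range(len(A)-1):
--         value += A[i] * A[i+1]
--     value += A[-1] * A[-0]
--     return value
--
-- def minimize_multiplication(A):
--     len_A = len(A)
--     value = get_value(A)
--     for i in range(len_A-1):
--         j = 2
--         while i+j <= len_A:
--             B = A.copy()
--             B[i:i+j] = A[i:i+j][::-1]
--             value = min(value, get_value(B))
--             j += 1
--     return value
-- ===== SOURCE B (Python) =====
-- def minimize_multiplication(A):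
--     n = len(A)
--     base = A[-1] * A[0]
--     for k in range(n - 1):
--         base += A[k] * A[k + 1]
--     best = base
--     for i in range(n - 1):
--         for j in range(2, n - i + 1):
--             if i == 0 and j == n:
--                 cand = base
--             else:
--                 l = A[(i - 1) % n]
--                 r = A[(i + j) % n]
--                 cand = base - l * A[i] - A[i + j - 1] * r + l * A[i + j - 1] + A[i] * r
--             if cand < best:
--                 best = cand
--     return best
-- ===== Notes on version B (the rewrite author's own statement) =====
-- stated objective: faster
-- what changed: Instead of copying the list and recomputing the full circular adjacent-product sum for every (i,j) segment reversal, B computes the base sum once and derives each candidate with an O(1) boundary-delta update (only the two edges at the reversed segment's ends change; a full-list reversal leaves the sum unchanged).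
import Mathlib
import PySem

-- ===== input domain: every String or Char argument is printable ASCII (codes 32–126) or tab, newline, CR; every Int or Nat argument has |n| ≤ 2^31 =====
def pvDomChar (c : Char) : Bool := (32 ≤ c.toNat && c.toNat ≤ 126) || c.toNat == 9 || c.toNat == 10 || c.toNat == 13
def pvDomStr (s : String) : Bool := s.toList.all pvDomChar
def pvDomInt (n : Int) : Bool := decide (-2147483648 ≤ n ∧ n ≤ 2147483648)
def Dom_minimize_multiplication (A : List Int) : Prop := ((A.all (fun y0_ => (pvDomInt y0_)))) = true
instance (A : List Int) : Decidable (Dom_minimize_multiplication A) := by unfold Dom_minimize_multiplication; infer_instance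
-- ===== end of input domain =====

-- B replaces A's full O(n) recomputation of the circular adjacent-product sum for every reversed
-- copy by an O(1) boundary-delta update per (i,j) reversal (objective: faster, O(n^3) → O(n^2)).

-- ===== PORT A =====
-- helper get_value: sum of A[i]*A[i+1] over i in range(len(A)-1), plus A[-1]*A[-0] (A[-0] is A[0])
def get_value (A : List Int) : Int :=
  let value : Int := (PySem.List.pyRange 0 ((A.length : Int) - 1) 1).foldl
    (fun value i => value + PySem.List.pyGetD A i 0 * PySem.List.pyGetD A (i + 1) 0) 0
  value + PySem.List.pyGetD A (-1) 0 * PySem.List.pyGetD A 0 0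

-- the 'while i+j <= len_A' loop; B = A.copy(); B[i:i+j] = A[i:i+j][::-1] gives
-- A[:i] ++ reverse(A[i:i+j]) ++ A[i+j:]  ([::-1] is List.reverse, PySem.List.slice?_none_none_neg_one)
def mmWhile (A : List Int) (lenA i : Int) (j : Int) (value : Int) : Int :=
  if _h : i + j ≤ lenA then
    let B := PySem.List.slice A (some 0) (some i)
      ++ (PySem.List.slice A (some i) (some (i + j))).reverse
      ++ PySem.List.slice A (some (i + j)) none
    mmWhile A lenA i (j + 1) (min value (get_value B))
  else value
termination_by (lenA + 1 - (i + j)).toNat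
decreasing_by omega

def minimize_multiplication (A : List Int) : Int :=
  let len_A : Int := A.length
  let value := get_value A
  (PySem.List.pyRange 0 (len_A - 1) 1).foldl (fun value i => mmWhile A len_A i 2 value) value

-- ===== PORT B =====
def minimize_multiplication_alt (A : List Int) : Int :=
  let n : Int := A.length
  let base := (PySem.List.pyRange 0 (n - 1) 1).foldl
    (fun base k => base + PySem.List.pyGetD A k 0 * PySem.List.pyGetD A (k + 1) 0)
    (PySem.List.pyGetD A (-1) 0 * PySem.List.pyGetD A 0 0)
  (PySem.List.pyRange 0 (n - 1) 1).foldl (fun best i =>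
    (PySem.List.pyRange 2 (n - i + 1) 1).foldl (fun best j =>
      let cand : Int :=
        if i = 0 ∧ j = n then base
        else
          let l := PySem.List.pyGetD A (PySem.Int.mod (i - 1) n) 0
          let r := PySem.List.pyGetD A (PySem.Int.mod (i + j) n) 0
          base - l * PySem.List.pyGetD A i 0 - PySem.List.pyGetD A (i + j - 1) 0 * r
            + l * PySem.List.pyGetD A (i + j - 1) 0 + PySem.List.pyGetD A i 0 * r
      if cand < best then cand else best) best) base

-- ===== PRECONDITION & SPEC =====
-- Pre_ excludes only the empty list, on which Python A raises IndexError (A[-1]).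
def Pre_minimize_multiplication (A : List Int) : Prop := A ≠ []
instance (A : List Int) : Decidable (Pre_minimize_multiplication A) := by
  unfold Pre_minimize_multiplication; infer_instance
def pvWitness_minimize_multiplication : List Int := [1, 2, 3]

def Spec_minimize_multiplication (A : List Int) (out : Int) : Prop := out = minimize_multiplication_alt A
instance (A : List Int) (out : Int) : Decidable (Spec_minimize_multiplication A out) := by
  unfold Spec_minimize_multiplication; infer_instance

-- ===== CLAIM (what is proved, stated in full; the proofs are below) =====
def Claim_equal_minimize_multiplication : Prop := ∀ (A : List Int), Dom_minimize_multiplication A → Pre_minimize_multiplication A → Spec_minimize_multiplication A (minimize_multiplication A)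

-- ===== LEMMAS AND PROOFS =====

-- sum of adjacent products of a list
def adjS : List Int → Int
  | x :: y :: t => x * y + adjS (y :: t)
  | _ => 0

-- circular adjacent-product sum (A nonempty in all uses)
def cycS (X : List Int) : Int := adjS X + X.getLastD 0 * X.headD 0

-- B's candidate value for the (i,j) reversal, with base = get_value A
def candB (A : List Int) (base i j : Int) : Int :=
  if i = 0 ∧ j = (A.length : Int) then base
  else
    let l := PySem.List.pyGetD A (PySem.Int.mod (i - 1) (A.length : Int)) 0
    let r := PySem.List.pyGetD A (PySem.Int.mod (i + j) (A.length : Int)) 0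
    base - l * PySem.List.pyGetD A i 0 - PySem.List.pyGetD A (i + j - 1) 0 * r
      + l * PySem.List.pyGetD A (i + j - 1) 0 + PySem.List.pyGetD A i 0 * r

lemma adjS_cons (x : Int) (t : List Int) (h : t ≠ []) :
    adjS (x :: t) = x * t.headD 0 + adjS t := by
  cases t with
  | nil => simp at h
  | cons y u => simp [adjS]

lemma adj_sum (A : List Int) :
    ((List.range (A.length - 1)).map (fun k => A.getD k 0 * A.getD (k + 1) 0)).sum = adjS A := by
  induction A with
  | nil => simp [adjS]
  | cons a t ih =>
    cases t with
    | nil => simp [adjS]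
    | cons b u =>
      have h : (a :: b :: u).length - 1 = ((b :: u).length - 1) + 1 := by simp
      rw [h, List.range_succ_eq_map, List.map_cons, List.map_map, List.sum_cons]
      have h2 : ((fun k => (a :: b :: u).getD k 0 * (a :: b :: u).getD (k + 1) 0) ∘ Nat.succ)
          = (fun k => (b :: u).getD k 0 * (b :: u).getD (k + 1) 0) := by
        funext k
        simp
      rw [h2, ih]
      simp [adjS]

lemma adj_fold (A : List Int) (c : Int) :
    (PySem.List.pyRange 0 ((A.length : Int) - 1) 1).foldl
      (fun v i => v + PySem.List.pyGetD A i 0 * PySem.List.pyGetD A (i + 1) 0) c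
    = c + adjS A := by
  rw [PySem.List.foldl_add, PySem.List.pyRange_one]
  have h1 : (((A.length : Int) - 1) - 0).toNat = A.length - 1 := by omega
  rw [h1, List.map_map, ← adj_sum A]
  congr 1
  apply congrArg
  apply List.map_congr_left
  intro k hk
  have e1 : (0 : Int) + (k : Int) = ((k : Nat) : Int) := by omega
  have e2 : ((k : Int) + 1) = (((k + 1 : Nat)) : Int) := by push_cast; ring
  simp only [Function.comp, e1, e2, PySem.List.pyGetD_natCast]

lemma gv_cyc (X : List Int) (h : X ≠ []) : get_value X = cycS X := by
  simp only [get_value]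
  rw [adj_fold, PySem.List.pyGetD_neg_one X 0 h, PySem.List.pyGetD_zero]
  simp only [cycS, List.getD_eq_getElem?_getD, ← List.head?_eq_getElem?,
    List.headD_eq_head?_getD, List.getLastD_eq_getLast?,
    List.getLast?_eq_some_getLast (h := h), Option.getD_some]
  ring

lemma headD_append_left (X Y : List Int) (h : X ≠ []) : (X ++ Y).headD 0 = X.headD 0 := by
  simp [List.headD_eq_head?_getD, List.head?_append_of_ne_nil X h]

lemma getLastD_append_right (X Y : List Int) (h : Y ≠ []) : (X ++ Y).getLastD 0 = Y.getLastD 0 := by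
  simp [List.getLastD_eq_getLast?, List.getLast?_append_of_ne_nil X h]

lemma adjS_append (X Y : List Int) (hX : X ≠ []) (hY : Y ≠ []) :
    adjS (X ++ Y) = adjS X + X.getLastD 0 * Y.headD 0 + adjS Y := by
  induction X with
  | nil => simp at hX
  | cons a t ih =>
    cases t with
    | nil =>
      rw [List.cons_append, List.nil_append, adjS_cons a Y hY]
      simp [adjS]
    | cons b u =>
      have hbu : (b :: u : List Int) ≠ [] := by simp
      rw [List.cons_append, adjS_cons a _ (by simp), ih hbu, adjS_cons a (b :: u) hbu]
      have h1 : ((b :: u) ++ Y).headD 0 = b := rfl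
      have h2 : (a :: b :: u).getLastD 0 = (b :: u).getLastD 0 := by
        have := getLastD_append_right [a] (b :: u) hbu
        simpa using this
      rw [h1, h2]
      have h3 : (b :: u).headD 0 = b := rfl
      rw [h3]
      ring

lemma adjS_reverse (X : List Int) : adjS X.reverse = adjS X := by
  induction X with
  | nil => simp [adjS]
  | cons x t ih =>
    cases htn : t with
    | nil => simp [adjS]
    | cons b u =>
      have ht : t ≠ [] := by simp [htn]
      have htr : t.reverse ≠ [] := by simp [ht]
      rw [← htn] at *
      rw [List.reverse_cons, adjS_append t.reverse [x] htr (by simp), ih,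
        adjS_cons x t ht]
      have h1 : t.reverse.getLastD 0 = t.headD 0 := by
        rw [List.getLastD_eq_getLast?, List.getLast?_reverse, List.headD_eq_head?_getD]
      have h2 : ([x] : List Int).headD 0 = x := rfl
      rw [h1, h2]
      simp [adjS]
      ring

lemma cyc_rev (S : List Int) : cycS S.reverse = cycS S := by
  simp only [cycS, adjS_reverse, List.getLastD_eq_getLast?, List.getLast?_reverse,
    List.headD_eq_head?_getD, List.head?_reverse]
  ring

lemma cyc_mid (P S Q : List Int) (hP : P ≠ []) (hS : S ≠ []) (hQ : Q ≠ []) :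
    cycS (P ++ S.reverse ++ Q)
      = cycS (P ++ S ++ Q) - P.getLastD 0 * S.headD 0 - S.getLastD 0 * Q.headD 0
        + P.getLastD 0 * S.getLastD 0 + S.headD 0 * Q.headD 0 := by
  have hSr : S.reverse ≠ [] := by simp [hS]
  have hPSr : P ++ S.reverse ≠ [] := by simp [hP]
  have hPS : P ++ S ≠ [] := by simp [hP]
  have hrL : S.reverse.getLastD 0 = S.headD 0 := by
    rw [List.getLastD_eq_getLast?, List.getLast?_reverse, List.headD_eq_head?_getD]
  have hrH : S.reverse.headD 0 = S.getLastD 0 := by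
    rw [List.headD_eq_head?_getD, List.head?_reverse, List.getLastD_eq_getLast?]
  simp only [cycS, adjS_append _ Q hPSr hQ, adjS_append _ Q hPS hQ,
    adjS_append P S.reverse hP hSr, adjS_append P S hP hS, adjS_reverse,
    getLastD_append_right _ Q hQ, getLastD_append_right P S.reverse hSr,
    getLastD_append_right P S hS,
    headD_append_left _ Q hPSr, headD_append_left _ Q hPS,
    headD_append_left P S.reverse hP, headD_append_left P S hP, hrL, hrH]
  ring

lemma cyc_left (S Q : List Int) (hS : S ≠ []) (hQ : Q ≠ []) :
    cycS (S.reverse ++ Q)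
      = cycS (S ++ Q) - Q.getLastD 0 * S.headD 0 - S.getLastD 0 * Q.headD 0
        + Q.getLastD 0 * S.getLastD 0 + S.headD 0 * Q.headD 0 := by
  have hSr : S.reverse ≠ [] := by simp [hS]
  have hrL : S.reverse.getLastD 0 = S.headD 0 := by
    rw [List.getLastD_eq_getLast?, List.getLast?_reverse, List.headD_eq_head?_getD]
  have hrH : S.reverse.headD 0 = S.getLastD 0 := by
    rw [List.headD_eq_head?_getD, List.head?_reverse, List.getLastD_eq_getLast?]
  simp only [cycS, adjS_append S.reverse Q hSr hQ, adjS_append S Q hS hQ, adjS_reverse,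
    getLastD_append_right _ Q hQ, headD_append_left S.reverse Q hSr,
    headD_append_left S Q hS, hrL, hrH]
  ring

lemma cyc_right (P S : List Int) (hP : P ≠ []) (hS : S ≠ []) :
    cycS (P ++ S.reverse)
      = cycS (P ++ S) - P.getLastD 0 * S.headD 0 - S.getLastD 0 * P.headD 0
        + P.getLastD 0 * S.getLastD 0 + S.headD 0 * P.headD 0 := by
  have hSr : S.reverse ≠ [] := by simp [hS]
  have hrL : S.reverse.getLastD 0 = S.headD 0 := by
    rw [List.getLastD_eq_getLast?, List.getLast?_reverse, List.headD_eq_head?_getD]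
  have hrH : S.reverse.headD 0 = S.getLastD 0 := by
    rw [List.headD_eq_head?_getD, List.head?_reverse, List.getLastD_eq_getLast?]
  simp only [cycS, adjS_append P S.reverse hP hSr, adjS_append P S hP hS, adjS_reverse,
    getLastD_append_right P S.reverse hSr, getLastD_append_right P S hS,
    headD_append_left P S.reverse hP, headD_append_left P S hP, hrL, hrH]
  ring

lemma getD_append_len (X Y : List Int) : (X ++ Y).getD X.length 0 = Y.headD 0 := by
  rw [List.getD_eq_getElem?_getD, List.getElem?_append_right (le_refl X.length)]
  simp [List.headD_eq_head?_getD, List.head?_eq_getElem?]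

lemma getD_append_len_sub_one (X Y : List Int) (hX : X ≠ []) :
    (X ++ Y).getD (X.length - 1) 0 = X.getLastD 0 := by
  have hlt : X.length - 1 < X.length := by
    cases X with
    | nil => simp at hX
    | cons a t => simp
  rw [List.getD_eq_getElem?_getD, List.getElem?_append_left hlt]
  simp [List.getLastD_eq_getLast?, List.getLast?_eq_getElem?]

lemma getD_last (A : List Int) (h : A ≠ []) : A.getD (A.length - 1) 0 = A.getLastD 0 := by
  have := getD_append_len_sub_one A [] h
  simpa using this

lemma getD_zero_headD (X : List Int) : X.getD 0 0 = X.headD 0 := by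
  cases X <;> simp

lemma getD_append_at (X Y : List Int) (k : Nat) (hk : k = X.length) :
    (X ++ Y).getD k 0 = Y.headD 0 := by
  subst hk; exact getD_append_len X Y

lemma getD_append_at_last (X Y : List Int) (k : Nat) (hX : X ≠ []) (hk : k + 1 = X.length) :
    (X ++ Y).getD k 0 = X.getLastD 0 := by
  have : k = X.length - 1 := by omega
  subst this; exact getD_append_len_sub_one X Y hX

-- the core delta lemma: get_value of the (i,j)-reversed copy equals B's candidate
lemma gv_reversed (A : List Int) (hA : A ≠ []) (i j : Int) (hi : 0 ≤ i) (hj : 2 ≤ j)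
    (hij : i + j ≤ (A.length : Int)) :
    get_value (PySem.List.slice A (some 0) (some i)
      ++ (PySem.List.slice A (some i) (some (i + j))).reverse
      ++ PySem.List.slice A (some (i + j)) none)
    = candB A (get_value A) i j := by
  obtain ⟨ii, rfl⟩ : ∃ ii : Nat, i = (ii : Int) := ⟨i.toNat, by omega⟩
  obtain ⟨jj, rfl⟩ : ∃ jj : Nat, j = (jj : Int) := ⟨j.toNat, by omega⟩
  have hjj2 : 2 ≤ jj := by exact_mod_cast hj
  have hijn : ii + jj ≤ A.length := by exact_mod_cast hij
  have hnpos : 0 < A.length := List.length_pos_iff.mpr hA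
  have hs0 : PySem.List.slice A (some (0 : Int)) (some (ii : Int)) = A.take ii := by
    rw [PySem.List.slice_zero_start, PySem.List.slice_to_natCast]
  have hs1 : PySem.List.slice A (some (ii : Int)) (some ((ii : Int) + (jj : Int)))
      = (A.drop ii).take jj := PySem.List.slice_natCast_add A ii jj
  have hs2 : PySem.List.slice A (some ((ii : Int) + (jj : Int))) none = A.drop (ii + jj) := by
    have e : (ii : Int) + (jj : Int) = ((ii + jj : Nat) : Int) := by push_cast; ring
    rw [e, PySem.List.slice_from_natCast]
  rw [hs0, hs1, hs2]
  have hlenS : ((A.drop ii).take jj).length = jj := by simp; omega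
  have hSne : (A.drop ii).take jj ≠ [] := by
    apply List.length_pos_iff.mp; omega
  have hsplit : A = A.take ii ++ ((A.drop ii).take jj ++ A.drop (ii + jj)) := by
    conv_lhs => rw [← List.take_append_drop ii A]
    congr 1
    conv_lhs => rw [← List.take_append_drop jj (A.drop ii)]
    rw [List.drop_drop, Nat.add_comm]
  by_cases hfull : ii = 0 ∧ jj = A.length
  · -- full reversal: value unchanged
    have hP0 : A.take ii = ([] : List Int) := by rw [hfull.1]; exact List.take_zero
    have hQ0 : A.drop (ii + jj) = ([] : List Int) := List.drop_eq_nil_of_le (by omega)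
    have hSA : (A.drop ii).take jj = A := by
      rw [hfull.1, List.drop_zero]; exact List.take_of_length_le (by omega)
    rw [hP0, hQ0, hSA, List.nil_append, List.append_nil]
    rw [candB, if_pos ⟨by simp [hfull.1], by simp [hfull.2]⟩]
    rw [gv_cyc A.reverse (by simp [hA]), cyc_rev, ← gv_cyc A hA]
  · rw [candB, if_neg (by omega)]
    simp only []
    by_cases hii0 : ii = 0
    · -- reversed prefix: B = S.reverse ++ Q
      have hjlt : jj < A.length := by
        rcases Nat.lt_or_ge jj A.length with h | h
        · exact h
        · exact absurd ⟨hii0, by omega⟩ hfull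
      have hQne : A.drop (ii + jj) ≠ [] := by
        apply List.length_pos_iff.mp; simp; omega
      have hP0 : A.take ii = ([] : List Int) := by rw [hii0]; exact List.take_zero
      have hA0 : A = (A.drop ii).take jj ++ A.drop (ii + jj) := by
        conv_lhs => rw [hsplit]
        rw [hP0, List.nil_append]
      have m1 : PySem.Int.mod ((ii : Int) - 1) (A.length : Int) = (A.length : Int) - 1 := by
        rw [PySem.Int.mod_eq_emod_of_pos (by exact_mod_cast hnpos)]
        have e : (ii : Int) - 1 = ((A.length : Int) - 1) - (A.length : Int) := by omega
        rw [e, Int.sub_emod_right]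
        exact Int.emod_eq_of_lt (by omega) (by omega)
      have g1 : PySem.List.pyGetD A ((A.length : Int) - 1) 0 = (A.drop (ii + jj)).getLastD 0 := by
        have e : (A.length : Int) - 1 = ((A.length - 1 : Nat) : Int) := by omega
        rw [e, PySem.List.pyGetD_natCast, getD_last A hA]
        conv_lhs => rw [hA0]
        exact getLastD_append_right _ _ hQne
      have m2 : PySem.Int.mod ((ii : Int) + (jj : Int)) (A.length : Int) = (ii : Int) + (jj : Int) := by
        rw [PySem.Int.mod_eq_emod_of_pos (by exact_mod_cast hnpos)]
        exact Int.emod_eq_of_lt (by omega) (by omega)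
      have g2 : PySem.List.pyGetD A ((ii : Int) + (jj : Int)) 0 = (A.drop (ii + jj)).headD 0 := by
        have e : (ii : Int) + (jj : Int) = ((ii + jj : Nat) : Int) := by omega
        rw [e, PySem.List.pyGetD_natCast]
        conv_lhs => rw [hA0]
        exact getD_append_at _ _ _ (by omega)
      have g3 : PySem.List.pyGetD A ((ii : Nat) : Int) 0 = ((A.drop ii).take jj).headD 0 := by
        rw [PySem.List.pyGetD_natCast]
        have e : A.getD ii 0 = A.headD 0 := by rw [hii0, getD_zero_headD]
        rw [e]
        conv_lhs => rw [hA0]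
        exact headD_append_left _ _ hSne
      have g4 : PySem.List.pyGetD A (((ii : Nat) : Int) + (jj : Int) - 1) 0
          = ((A.drop ii).take jj).getLastD 0 := by
        have e : ((ii : Nat) : Int) + (jj : Int) - 1 = ((ii + jj - 1 : Nat) : Int) := by omega
        rw [e, PySem.List.pyGetD_natCast]
        conv_lhs => rw [hA0]
        exact getD_append_at_last _ _ _ hSne (by omega)
      rw [m1, g1, m2, g2, g3, g4, hP0, List.nil_append]
      rw [gv_cyc _ (by simp [hSne] : ((A.drop ii).take jj).reverse ++ A.drop (ii + jj) ≠ [])]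
      rw [cyc_left _ _ hSne hQne]
      have hcA : cycS A = cycS ((A.drop ii).take jj ++ A.drop (ii + jj)) := by
        conv_lhs => rw [hA0]
      rw [gv_cyc A hA, hcA]
    · by_cases hend : ii + jj = A.length
      · -- reversed suffix: B = P ++ S.reverse
        have hPne : A.take ii ≠ [] := by
          apply List.length_pos_iff.mp; simp; omega
        have hQ0 : A.drop (ii + jj) = ([] : List Int) := List.drop_eq_nil_of_le (by omega)
        have hA0 : A = A.take ii ++ (A.drop ii).take jj := by
          conv_lhs => rw [hsplit]
          rw [hQ0, List.append_nil]
        have m1 : PySem.Int.mod ((ii : Int) - 1) (A.length : Int) = ((ii - 1 : Nat) : Int) := by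
          rw [PySem.Int.mod_eq_emod_of_pos (by exact_mod_cast hnpos)]
          have e : (ii : Int) - 1 = ((ii - 1 : Nat) : Int) := by omega
          rw [e]
          exact Int.emod_eq_of_lt (by omega) (by omega)
        have g1 : PySem.List.pyGetD A ((ii - 1 : Nat) : Int) 0 = (A.take ii).getLastD 0 := by
          rw [PySem.List.pyGetD_natCast]
          conv_lhs => rw [hA0]
          exact getD_append_at_last _ _ _ hPne (by simp; omega)
        have m2 : PySem.Int.mod ((ii : Int) + (jj : Int)) (A.length : Int) = ((0 : Nat) : Int) := by
          rw [PySem.Int.mod_eq_emod_of_pos (by exact_mod_cast hnpos)]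
          have e : (ii : Int) + (jj : Int) = (A.length : Int) := by omega
          rw [e, Int.emod_self]; simp
        have g2 : PySem.List.pyGetD A ((0 : Nat) : Int) 0 = (A.take ii).headD 0 := by
          rw [PySem.List.pyGetD_natCast, getD_zero_headD]
          conv_lhs => rw [hA0]
          exact headD_append_left _ _ hPne
        have g3 : PySem.List.pyGetD A ((ii : Nat) : Int) 0 = ((A.drop ii).take jj).headD 0 := by
          rw [PySem.List.pyGetD_natCast]
          conv_lhs => rw [hA0]
          exact getD_append_at _ _ _ (by simp; omega)
        have g4 : PySem.List.pyGetD A (((ii : Nat) : Int) + (jj : Int) - 1) 0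
            = ((A.drop ii).take jj).getLastD 0 := by
          have e : ((ii : Nat) : Int) + (jj : Int) - 1 = ((A.length - 1 : Nat) : Int) := by omega
          rw [e, PySem.List.pyGetD_natCast, getD_last A hA]
          conv_lhs => rw [hA0]
          exact getLastD_append_right _ _ hSne
        rw [m1, g1, m2, g2, g3, g4, hQ0, List.append_nil]
        rw [gv_cyc _ (by simp [hPne] : A.take ii ++ ((A.drop ii).take jj).reverse ≠ [])]
        rw [cyc_right _ _ hPne hSne]
        have hcA : cycS A = cycS (A.take ii ++ (A.drop ii).take jj) := by
          conv_lhs => rw [hA0]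
        rw [gv_cyc A hA, hcA]
      · -- interior reversal: B = P ++ S.reverse ++ Q
        have hPne : A.take ii ≠ [] := by
          apply List.length_pos_iff.mp; simp; omega
        have hQne : A.drop (ii + jj) ≠ [] := by
          apply List.length_pos_iff.mp; simp; omega
        have hA0 : A = A.take ii ++ ((A.drop ii).take jj ++ A.drop (ii + jj)) := hsplit
        have hA1 : A = (A.take ii ++ (A.drop ii).take jj) ++ A.drop (ii + jj) := by
          rw [List.append_assoc]; exact hsplit
        have m1 : PySem.Int.mod ((ii : Int) - 1) (A.length : Int) = ((ii - 1 : Nat) : Int) := by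
          rw [PySem.Int.mod_eq_emod_of_pos (by exact_mod_cast hnpos)]
          have e : (ii : Int) - 1 = ((ii - 1 : Nat) : Int) := by omega
          rw [e]
          exact Int.emod_eq_of_lt (by omega) (by omega)
        have g1 : PySem.List.pyGetD A ((ii - 1 : Nat) : Int) 0 = (A.take ii).getLastD 0 := by
          rw [PySem.List.pyGetD_natCast]
          conv_lhs => rw [hA0]
          exact getD_append_at_last _ _ _ hPne (by simp; omega)
        have m2 : PySem.Int.mod ((ii : Int) + (jj : Int)) (A.length : Int) = (ii : Int) + (jj : Int) := by
          rw [PySem.Int.mod_eq_emod_of_pos (by exact_mod_cast hnpos)]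
          exact Int.emod_eq_of_lt (by omega) (by omega)
        have g2 : PySem.List.pyGetD A ((ii : Int) + (jj : Int)) 0 = (A.drop (ii + jj)).headD 0 := by
          have e : (ii : Int) + (jj : Int) = ((ii + jj : Nat) : Int) := by omega
          rw [e, PySem.List.pyGetD_natCast]
          conv_lhs => rw [hA1]
          exact getD_append_at _ _ _ (by simp; omega)
        have g3 : PySem.List.pyGetD A ((ii : Nat) : Int) 0 = ((A.drop ii).take jj).headD 0 := by
          rw [PySem.List.pyGetD_natCast]
          conv_lhs => rw [hA0]
          rw [getD_append_at _ _ _ (by simp; omega)]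
          exact headD_append_left _ _ hSne
        have g4 : PySem.List.pyGetD A (((ii : Nat) : Int) + (jj : Int) - 1) 0
            = ((A.drop ii).take jj).getLastD 0 := by
          have e : ((ii : Nat) : Int) + (jj : Int) - 1 = ((ii + jj - 1 : Nat) : Int) := by omega
          rw [e, PySem.List.pyGetD_natCast]
          conv_lhs => rw [hA1]
          rw [getD_append_at_last _ _ _ (by simp [hPne]) (by simp; omega)]
          exact getLastD_append_right _ _ hSne
        rw [m1, g1, m2, g2, g3, g4]
        rw [gv_cyc _ (by simp [hPne] :
          A.take ii ++ ((A.drop ii).take jj).reverse ++ A.drop (ii + jj) ≠ [])]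
        rw [cyc_mid _ _ _ hPne hSne hQne]
        have hcA : cycS A = cycS (A.take ii ++ (A.drop ii).take jj ++ A.drop (ii + jj)) := by
          conv_lhs => rw [hA1]
        rw [gv_cyc A hA, hcA]

lemma inner_eq (A : List Int) (hA : A ≠ []) (i : Int) (hi : 0 ≤ i) :
    ∀ (k : Nat) (j v : Int), 2 ≤ j → j = (A.length : Int) - i + 1 - k →
    mmWhile A (A.length : Int) i j v
      = (PySem.List.pyRange j ((A.length : Int) - i + 1) 1).foldl
          (fun best j =>
            let cand := candB A (get_value A) i j
            if cand < best then cand else best) v := by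
  intro k
  induction k with
  | zero =>
    intro j v hj2 hjk
    rw [mmWhile, dif_neg (by omega), PySem.List.pyRange_one_eq_nil (by omega)]
    rfl
  | succ k ih =>
    intro j v hj2 hjk
    rw [mmWhile, dif_pos (by omega)]
    rw [PySem.List.pyRange_one_cons (by omega : j < (A.length : Int) - i + 1), List.foldl_cons]
    simp only []
    have hstep : min v (get_value (PySem.List.slice A (some 0) (some i)
        ++ (PySem.List.slice A (some i) (some (i + j))).reverse
        ++ PySem.List.slice A (some (i + j)) none))
        = (if candB A (get_value A) i j < v then candB A (get_value A) i j else v) := by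
      rw [gv_reversed A hA i j hi hj2 (by omega)]
      rcases lt_or_ge (candB A (get_value A) i j) v with h | h
      · rw [if_pos h, min_eq_right (le_of_lt h)]
      · rw [if_neg (not_lt.mpr h), min_eq_left h]
    rw [hstep]
    exact ih (j + 1) _ (by omega) (by omega)

-- ===== VERDICT (by name: the statement is the Claim_ definition above) =====
theorem minimize_multiplication_spec : Claim_equal_minimize_multiplication := by
  unfold Claim_equal_minimize_multiplication
  intro A _hdom hpre
  unfold Spec_minimize_multiplication
  unfold minimize_multiplication minimize_multiplication_alt
  simp only []
  have hbase : (PySem.List.pyRange 0 ((A.length : Int) - 1) 1).foldl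
      (fun base k => base + PySem.List.pyGetD A k 0 * PySem.List.pyGetD A (k + 1) 0)
      (PySem.List.pyGetD A (-1) 0 * PySem.List.pyGetD A 0 0) = get_value A := by
    rw [adj_fold]
    simp only [get_value]
    rw [adj_fold]
    ring
  rw [hbase]
  apply PySem.List.foldl_congr_mem
  intro acc x hx
  rw [PySem.List.mem_pyRange_one] at hx
  have h := inner_eq A hpre x hx.1 ((A.length : Int) - x - 1).toNat 2 acc (by omega) (by omega)
  rw [h]
  rfl
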